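-- pv_equiv track=rewrite | github.com/bakunobu/exercise | 1400_basic_tasks/chap_9/ex_9_41.py | num_sum_eq
-- ===== SOURCE A (Python) =====
-- def num_sum_eq(n:int=27) -> list:
--     nums = []
--     for a in range(1, 10):
--         for b in range(1, 10):
--             for c in range(1, 10):
--                 if a + b + c == n:
--                     temp_nums = [a * 100 + b * 10 + c,
--                                  a * 100 + c * 10 + b,
--                                  b * 100 + a * 10 + c,
--                                  b * 100 + c * 10 + a,
--                                  c * 100 + a * 10 + b,
--                                  c * 100 + b * 10 + a]
--                     for x in temp_nums:
--                         if x not in nums: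
--                             nums.append(x)
--     return(sorted(nums))
-- ===== SOURCE B (Python) =====
-- def num_sum_eq(n: int = 27) -> list:
--     result = []
--     for a in range(1, 10):
--         for b in range(1, 10):
--             for c in range(1, 10):
--                 if a + b + c == n:
--                     result.append(a * 100 + b * 10 + c)
--     return sorted(result)
-- ===== Notes on version B (the rewrite author's own statement) =====
-- stated objective: simpler
-- what changed: Drops the six-way permutation expansion and the linear-scan 'x not in nums' dedup: the full triple enumeration already visits every ordering of the digits once, so B just appends the three-digit number built from a,b,c whenever the digit sum matches and sorts once at the end.
import Mathlib
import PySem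

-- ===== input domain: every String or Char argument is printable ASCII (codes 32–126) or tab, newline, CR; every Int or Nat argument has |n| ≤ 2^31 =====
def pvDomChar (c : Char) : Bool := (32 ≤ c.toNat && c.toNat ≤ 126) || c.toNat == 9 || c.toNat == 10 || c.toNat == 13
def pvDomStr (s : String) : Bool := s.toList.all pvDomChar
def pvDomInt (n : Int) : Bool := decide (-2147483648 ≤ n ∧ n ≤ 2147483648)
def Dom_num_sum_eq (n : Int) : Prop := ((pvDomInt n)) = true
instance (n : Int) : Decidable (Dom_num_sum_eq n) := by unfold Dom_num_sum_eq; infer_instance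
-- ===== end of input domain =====

-- B drops A's six-way permutation expansion and its linear-scan "x not in nums" dedup:
-- the full triple loop already produces each valid number exactly once (objective: simpler).

-- ===== PORT A =====
-- the nums list A accumulates before the final sorted(...)
def pvNumsA (n : Int) : List Int :=
  (PySem.List.pyRange 1 10 1).foldl (fun nums a =>
    (PySem.List.pyRange 1 10 1).foldl (fun nums b =>
      (PySem.List.pyRange 1 10 1).foldl (fun nums c =>
        if a + b + c = n then
          ([a * 100 + b * 10 + c,
            a * 100 + c * 10 + b,
            b * 100 + a * 10 + c,
            b * 100 + c * 10 + a,
            c * 100 + a * 10 + b,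
            c * 100 + b * 10 + a]).foldl
              (fun nums x => if x ∈ nums then nums else nums ++ [x]) nums
        else nums) nums) nums) []

def num_sum_eq (n : Int) : List Int :=
  PySem.List.sorted (pvNumsA n) (fun x => x) false

-- ===== PORT B =====
-- the result list B accumulates before the final sorted(...)
def pvResultB (n : Int) : List Int :=
  (PySem.List.pyRange 1 10 1).foldl (fun result a =>
    (PySem.List.pyRange 1 10 1).foldl (fun result b =>
      (PySem.List.pyRange 1 10 1).foldl (fun result c =>
        if a + b + c = n then result ++ [a * 100 + b * 10 + c]
        else result) result) result) []

def num_sum_eq_alt (n : Int) : List Int :=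
  PySem.List.sorted (pvResultB n) (fun x => x) false

-- ===== PRECONDITION & SPEC =====
def Spec_num_sum_eq (n : Int) (out : List Int) : Prop := out = num_sum_eq_alt n
instance (n : Int) (out : List Int) : Decidable (Spec_num_sum_eq n out) := by unfold Spec_num_sum_eq; infer_instance

-- ===== CLAIM (what is proved, stated in full; the proofs are below) =====
def Claim_equal_num_sum_eq : Prop := ∀ (n : Int), Dom_num_sum_eq n → Spec_num_sum_eq n (num_sum_eq n)

-- ===== LEMMAS AND PROOFS =====

-- generic: membership in a foldl whose step adds exactly the x with P a x
theorem pv_foldl_mem {α : Type} (g : List Int → α → List Int) (P : α → Int → Prop)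
    (hg : ∀ acc a x, x ∈ g acc a ↔ x ∈ acc ∨ P a x) :
    ∀ (l : List α) (init : List Int) (x : Int),
      x ∈ l.foldl g init ↔ x ∈ init ∨ ∃ a ∈ l, P a x := by
  intro l
  induction l with
  | nil => simp
  | cons hd tl ih =>
    intro init x
    rw [List.foldl_cons, ih, hg]
    simp only [List.mem_cons]
    constructor
    · rintro ((h | h) | ⟨a, ha, hp⟩)
      · exact Or.inl h
      · exact Or.inr ⟨hd, Or.inl rfl, h⟩
      · exact Or.inr ⟨a, Or.inr ha, hp⟩
    · rintro (h | ⟨a, (rfl | ha), hp⟩)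
      · exact Or.inl (Or.inl h)
      · exact Or.inl (Or.inr hp)
      · exact Or.inr ⟨a, ha, hp⟩

-- generic: a property preserved by every step is preserved by the foldl
theorem pv_foldl_pres {α β : Type} (g : β → α → β) (p : β → Prop)
    (hg : ∀ acc a, p acc → p (g acc a)) :
    ∀ (l : List α) (init : β), p init → p (l.foldl g init) := by
  intro l
  induction l with
  | nil => intro init h; exact h
  | cons hd tl ih => intro init h; exact ih (g init hd) (hg init hd h)

theorem pv_dedup_step_mem (acc : List Int) (y x : Int) :
    x ∈ (if y ∈ acc then acc else acc ++ [y]) ↔ x ∈ acc ∨ x = y := by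
  split_ifs with h
  · constructor
    · exact Or.inl
    · rintro (h' | rfl)
      · exact h'
      · exact h
  · simp [List.mem_append]

theorem pv_dedup_mem (l init : List Int) (x : Int) :
    x ∈ l.foldl (fun ns y => if y ∈ ns then ns else ns ++ [y]) init ↔ x ∈ init ∨ x ∈ l := by
  rw [pv_foldl_mem _ (fun y x => x = y) (fun acc a x => pv_dedup_step_mem acc a x)]
  simp

-- membership after A's innermost (c) loop
theorem pvA_c_mem (n a b : Int) (acc : List Int) (x : Int) :
    x ∈ (PySem.List.pyRange 1 10 1).foldl (fun nums c =>
        if a + b + c = n then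
          ([a * 100 + b * 10 + c, a * 100 + c * 10 + b, b * 100 + a * 10 + c,
            b * 100 + c * 10 + a, c * 100 + a * 10 + b, c * 100 + b * 10 + a]).foldl
            (fun nums x => if x ∈ nums then nums else nums ++ [x]) nums
        else nums) acc
      ↔ x ∈ acc ∨ ∃ c, (1 ≤ c ∧ c < 10) ∧ (a + b + c = n ∧
          (x = a * 100 + b * 10 + c ∨ x = a * 100 + c * 10 + b ∨ x = b * 100 + a * 10 + c ∨
           x = b * 100 + c * 10 + a ∨ x = c * 100 + a * 10 + b ∨ x = c * 100 + b * 10 + a)) := by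
  rw [pv_foldl_mem _ (fun c x => a + b + c = n ∧
        (x = a * 100 + b * 10 + c ∨ x = a * 100 + c * 10 + b ∨ x = b * 100 + a * 10 + c ∨
         x = b * 100 + c * 10 + a ∨ x = c * 100 + a * 10 + b ∨ x = c * 100 + b * 10 + a)) ?_]
  · simp only [PySem.List.mem_pyRange_one]
  · intro acc' c y
    split_ifs with h
    · rw [pv_dedup_mem]
      simp [h]
    · simp [h]

-- membership after A's middle (b) loop
theorem pvA_b_mem (n a : Int) (acc : List Int) (x : Int) :
    x ∈ (PySem.List.pyRange 1 10 1).foldl (fun nums b =>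
        (PySem.List.pyRange 1 10 1).foldl (fun nums c =>
          if a + b + c = n then
            ([a * 100 + b * 10 + c, a * 100 + c * 10 + b, b * 100 + a * 10 + c,
              b * 100 + c * 10 + a, c * 100 + a * 10 + b, c * 100 + b * 10 + a]).foldl
              (fun nums x => if x ∈ nums then nums else nums ++ [x]) nums
          else nums) nums) acc
      ↔ x ∈ acc ∨ ∃ b, (1 ≤ b ∧ b < 10) ∧ ∃ c, (1 ≤ c ∧ c < 10) ∧ (a + b + c = n ∧
          (x = a * 100 + b * 10 + c ∨ x = a * 100 + c * 10 + b ∨ x = b * 100 + a * 10 + c ∨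
           x = b * 100 + c * 10 + a ∨ x = c * 100 + a * 10 + b ∨ x = c * 100 + b * 10 + a)) := by
  rw [pv_foldl_mem _ (fun b x => ∃ c, (1 ≤ c ∧ c < 10) ∧ (a + b + c = n ∧
        (x = a * 100 + b * 10 + c ∨ x = a * 100 + c * 10 + b ∨ x = b * 100 + a * 10 + c ∨
         x = b * 100 + c * 10 + a ∨ x = c * 100 + a * 10 + b ∨ x = c * 100 + b * 10 + a)))
      (fun acc' b y => pvA_c_mem n a b acc' y)]
  simp only [PySem.List.mem_pyRange_one]

-- membership in A's accumulated list
theorem pvA_mem (n x : Int) :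
    x ∈ pvNumsA n ↔ ∃ a, (1 ≤ a ∧ a < 10) ∧ ∃ b, (1 ≤ b ∧ b < 10) ∧ ∃ c, (1 ≤ c ∧ c < 10) ∧
      (a + b + c = n ∧
        (x = a * 100 + b * 10 + c ∨ x = a * 100 + c * 10 + b ∨ x = b * 100 + a * 10 + c ∨
         x = b * 100 + c * 10 + a ∨ x = c * 100 + a * 10 + b ∨ x = c * 100 + b * 10 + a)) := by
  unfold pvNumsA
  rw [pv_foldl_mem _ (fun a x => ∃ b, (1 ≤ b ∧ b < 10) ∧ ∃ c, (1 ≤ c ∧ c < 10) ∧ (a + b + c = n ∧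
        (x = a * 100 + b * 10 + c ∨ x = a * 100 + c * 10 + b ∨ x = b * 100 + a * 10 + c ∨
         x = b * 100 + c * 10 + a ∨ x = c * 100 + a * 10 + b ∨ x = c * 100 + b * 10 + a)))
      (fun acc' a y => pvA_b_mem n a acc' y)]
  simp only [PySem.List.mem_pyRange_one, List.not_mem_nil, false_or]

-- A's list has no duplicates (the "x not in nums" guard)
theorem pvA_nodup (n : Int) : (pvNumsA n).Nodup := by
  unfold pvNumsA
  apply pv_foldl_pres _ List.Nodup
  · intro acc a ha
    apply pv_foldl_pres _ List.Nodup
    · intro acc' b hb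
      apply pv_foldl_pres _ List.Nodup
      · intro acc'' c hc
        split_ifs with h
        · apply pv_foldl_pres _ List.Nodup
          · intro acc3 y hy
            split_ifs with hmem
            · exact hy
            · rw [List.nodup_append]
              refine ⟨hy, List.nodup_singleton y, ?_⟩
              intro z hz w hw
              rw [List.mem_singleton] at hw
              subst hw
              exact fun h' => hmem (h' ▸ hz)
          · exact hc
        · exact hc
      · exact hb
    · exact ha
  · exact List.nodup_nil

-- B-side closed forms (proof-only helpers)
def pvFB2 (n a b : Int) : List Int :=
  ((PySem.List.pyRange 1 10 1).filter (fun c => decide (a + b + c = n))).map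
    (fun c => a * 100 + b * 10 + c)

def pvFB1 (n a : Int) : List Int :=
  (PySem.List.pyRange 1 10 1).flatMap (pvFB2 n a)

theorem pv_foldl_ext {α β : Type} (f g : β → α → β) (h : ∀ acc a, f acc a = g acc a) :
    ∀ (l : List α) (init : β), l.foldl f init = l.foldl g init := by
  intro l
  induction l with
  | nil => intro init; rfl
  | cons hd tl ih => intro init; rw [List.foldl_cons, List.foldl_cons, h, ih]

theorem pvB_c_eq (n a b : Int) (acc : List Int) :
    (PySem.List.pyRange 1 10 1).foldl (fun result c =>
        if a + b + c = n then result ++ [a * 100 + b * 10 + c] else result) acc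
      = acc ++ pvFB2 n a b := by
  unfold pvFB2
  rw [pv_foldl_ext _ (fun result c =>
        if (fun c => decide (a + b + c = n)) c = true then result ++ [a * 100 + b * 10 + c] else result)
      (by intro acc' c; simp)]
  exact PySem.List.foldl_append_if _ _ _ _

theorem pvB_flat (n : Int) : pvResultB n = (PySem.List.pyRange 1 10 1).flatMap (pvFB1 n) := by
  unfold pvResultB
  rw [pv_foldl_ext _ (fun result a => result ++ pvFB1 n a) ?_]
  · rw [PySem.List.foldl_append_eq_flatMap]
    rfl
  · intro acc a
    unfold pvFB1
    rw [pv_foldl_ext _ (fun result b => result ++ pvFB2 n a b)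
        (fun acc' b => pvB_c_eq n a b acc')]
    exact PySem.List.foldl_append_eq_flatMap _ _ _

theorem pvB_mem (n x : Int) :
    x ∈ pvResultB n ↔ ∃ a, (1 ≤ a ∧ a < 10) ∧ ∃ b, (1 ≤ b ∧ b < 10) ∧ ∃ c, (1 ≤ c ∧ c < 10) ∧
      (a + b + c = n ∧ x = a * 100 + b * 10 + c) := by
  rw [pvB_flat]
  unfold pvFB1 pvFB2
  simp only [List.mem_flatMap, List.mem_map, List.mem_filter, PySem.List.mem_pyRange_one,
    decide_eq_true_eq]
  constructor
  · rintro ⟨a, ha, b, hb, c, ⟨hc, hsum⟩, hx⟩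
    exact ⟨a, ha, b, hb, c, hc, hsum, hx.symm⟩
  · rintro ⟨a, ha, b, hb, c, hc, hsum, hx⟩
    exact ⟨a, ha, b, hb, c, ⟨hc, hsum⟩, hx.symm⟩

theorem pvB_nodup (n : Int) : (pvResultB n).Nodup := by
  rw [pvB_flat]
  rw [List.nodup_flatMap]
  constructor
  · intro a _
    unfold pvFB1
    rw [List.nodup_flatMap]
    constructor
    · intro b _
      unfold pvFB2
      apply List.Nodup.map_on
      · intro c1 hc1 c2 hc2 h
        omega
      · exact List.Nodup.filter _ (PySem.List.nodup_pyRange_one 1 10)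
    · apply (PySem.List.pairwise_lt_pyRange_one 1 10).imp
      intro b1 b2 hlt x hx1 hx2
      simp only [pvFB2, List.mem_map, List.mem_filter, PySem.List.mem_pyRange_one,
        decide_eq_true_eq] at hx1 hx2
      obtain ⟨c1, ⟨hc1, _⟩, he1⟩ := hx1
      obtain ⟨c2, ⟨hc2, _⟩, he2⟩ := hx2
      omega
  · apply (PySem.List.pairwise_lt_pyRange_one 1 10).imp
    intro a1 a2 hlt x hx1 hx2
    simp only [pvFB1, pvFB2, List.mem_flatMap, List.mem_map, List.mem_filter,
      PySem.List.mem_pyRange_one, decide_eq_true_eq] at hx1 hx2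
    obtain ⟨b1, hb1, c1, ⟨hc1, _⟩, he1⟩ := hx1
    obtain ⟨b2, hb2, c2, ⟨hc2, _⟩, he2⟩ := hx2
    omega

-- the two accumulated lists hold the same set of numbers
theorem pv_perm (n : Int) : (pvResultB n).Perm (pvNumsA n) := by
  apply List.perm_of_nodup_nodup_toFinset_eq (pvB_nodup n) (pvA_nodup n)
  ext x
  simp only [List.mem_toFinset, pvA_mem, pvB_mem]
  constructor
  · rintro ⟨a, ha, b, hb, c, hc, hsum, hx⟩
    exact ⟨a, ha, b, hb, c, hc, hsum, Or.inl hx⟩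
  · rintro ⟨a, ⟨ha1, ha2⟩, b, ⟨hb1, hb2⟩, c, ⟨hc1, hc2⟩, hsum, hx⟩
    rcases hx with hx | hx | hx | hx | hx | hx
    · exact ⟨a, ⟨ha1, ha2⟩, b, ⟨hb1, hb2⟩, c, ⟨hc1, hc2⟩, by omega, hx⟩
    · exact ⟨a, ⟨ha1, ha2⟩, c, ⟨hc1, hc2⟩, b, ⟨hb1, hb2⟩, by omega, hx⟩
    · exact ⟨b, ⟨hb1, hb2⟩, a, ⟨ha1, ha2⟩, c, ⟨hc1, hc2⟩, by omega, hx⟩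
    · exact ⟨b, ⟨hb1, hb2⟩, c, ⟨hc1, hc2⟩, a, ⟨ha1, ha2⟩, by omega, hx⟩
    · exact ⟨c, ⟨hc1, hc2⟩, a, ⟨ha1, ha2⟩, b, ⟨hb1, hb2⟩, by omega, hx⟩
    · exact ⟨c, ⟨hc1, hc2⟩, b, ⟨hb1, hb2⟩, a, ⟨ha1, ha2⟩, by omega, hx⟩

-- ===== VERDICT (by name: the statement is the Claim_ definition above) =====
theorem num_sum_eq_spec : Claim_equal_num_sum_eq := by
  intro n _
  unfold Spec_num_sum_eq num_sum_eq num_sum_eq_alt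
  apply PySem.List.sorted_eq_of_perm_of_pairwise_lt
  · exact (PySem.List.sorted_perm (pvResultB n) (fun x => x) false).trans (pv_perm n)
  · have h1 := PySem.List.sorted_pairwise (pvResultB n) (fun x : Int => x)
    have h2 : (PySem.List.sorted (pvResultB n) (fun x : Int => x) false).Nodup :=
      (PySem.List.sorted_perm (pvResultB n) (fun x => x) false).symm.nodup (pvB_nodup n)
    exact (h1.and h2).imp (fun h => lt_of_le_of_ne h.1 h.2)
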